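-- pv_equiv track=rewrite | github.com/varunnnb/balco | app/main.py | generate_base_suggestions
-- ===== SOURCE A (Python) =====
-- def generate_base_suggestions(q_lower, metas):
--     types = {m.get("type") for m in (metas or []) if m.get("type")}
--
--     if "doctor" in types:
--         return ["Book appointment", "View doctors", "Contact hospital"]
--     if "department" in types:
--         return ["View doctors", "Book appointment", "Contact hospital"]
--     if "facility" in types:
--         return ["Check rooms", "View facilities", "Contact hospital"]
--     if "daycare" in types:
--         return ["Book chemo", "Daycare timings", "Contact hospital"]
--     if "health_library" in types:
--         return ["Read articles", "View symptoms", "Prevention tips"]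
--
--     return ["Find doctors", "Hospital timings", "Contact hospital"]
-- ===== SOURCE B (Python) =====
-- _RANK = {"doctor": 0, "department": 1, "facility": 2, "daycare": 3, "health_library": 4}
--
-- _SUGGESTIONS = [
--     ["Book appointment", "View doctors", "Contact hospital"],
--     ["View doctors", "Book appointment", "Contact hospital"],
--     ["Check rooms", "View facilities", "Contact hospital"],
--     ["Book chemo", "Daycare timings", "Contact hospital"],
--     ["Read articles", "View symptoms", "Prevention tips"],
--     ["Find doctors", "Hospital timings", "Contact hospital"],
-- ]
--
--
-- def generate_base_suggestions(q_lower, metas):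
--     best = 5
--     for m in (metas or []):
--         best = min(best, _RANK.get(m.get("type"), 5))
--     return list(_SUGGESTIONS[best])
-- ===== Notes on version B (the rewrite author's own statement) =====
-- stated objective: alternative
-- what changed: Replaced the set-of-types construction plus a hard-coded if-chain of membership tests by a single min-reduction: each meta is mapped to a numeric priority rank and the fold keeps the minimum, which then indexes a suggestion table.
import Mathlib
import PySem

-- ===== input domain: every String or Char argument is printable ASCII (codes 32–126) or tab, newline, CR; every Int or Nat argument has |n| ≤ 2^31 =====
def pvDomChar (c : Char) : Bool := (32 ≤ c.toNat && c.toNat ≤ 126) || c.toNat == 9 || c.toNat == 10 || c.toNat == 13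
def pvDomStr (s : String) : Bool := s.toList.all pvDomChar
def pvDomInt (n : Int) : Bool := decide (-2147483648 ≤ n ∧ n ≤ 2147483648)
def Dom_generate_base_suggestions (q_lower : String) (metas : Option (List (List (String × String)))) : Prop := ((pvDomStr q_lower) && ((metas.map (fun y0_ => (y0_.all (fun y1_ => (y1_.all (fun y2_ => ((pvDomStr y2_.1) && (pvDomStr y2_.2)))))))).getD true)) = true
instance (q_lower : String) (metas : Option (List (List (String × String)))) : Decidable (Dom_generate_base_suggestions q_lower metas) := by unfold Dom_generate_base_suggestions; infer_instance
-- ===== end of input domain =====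

-- B replaces A's set-of-types plus if-chain by a single min-reduction of numeric priority ranks indexing a suggestion table (objective: alternative; return value only — B returns a fresh copy like A).


-- ===== PORT A =====
def generate_base_suggestions (q_lower : String) (metas : Option (List (List (String × String)))) : List String :=
  let types : PySem.Set String :=
    (metas.getD []).foldl (fun acc m =>
      match (PySem.Dict.mk m).get? "type" with
      | some s => if s ≠ "" then PySem.Set.add acc s else acc
      | none => acc) PySem.Set.empty
  if PySem.Set.contains types "doctor" then ["Book appointment", "View doctors", "Contact hospital"]
  else if PySem.Set.contains types "department" then ["View doctors", "Book appointment", "Contact hospital"]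
  else if PySem.Set.contains types "facility" then ["Check rooms", "View facilities", "Contact hospital"]
  else if PySem.Set.contains types "daycare" then ["Book chemo", "Daycare timings", "Contact hospital"]
  else if PySem.Set.contains types "health_library" then ["Read articles", "View symptoms", "Prevention tips"]
  else ["Find doctors", "Hospital timings", "Contact hospital"]

-- ===== PORT B =====
-- _RANK.get(key, 5): first-match lookup in the 5-entry literal dict, written as the equivalent key-equality chain (exact for a literal dict with distinct keys; key may be None = Option.none)
def pvRankOf (o : Option String) : Nat :=
  if o == some "doctor" then 0
  else if o == some "department" then 1
  else if o == some "facility" then 2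
  else if o == some "daycare" then 3
  else if o == some "health_library" then 4
  else 5

def pvSuggestions : Nat → List String
  | 0 => ["Book appointment", "View doctors", "Contact hospital"]
  | 1 => ["View doctors", "Book appointment", "Contact hospital"]
  | 2 => ["Check rooms", "View facilities", "Contact hospital"]
  | 3 => ["Book chemo", "Daycare timings", "Contact hospital"]
  | 4 => ["Read articles", "View symptoms", "Prevention tips"]
  | _ => ["Find doctors", "Hospital timings", "Contact hospital"]

def generate_base_suggestions_alt (q_lower : String) (metas : Option (List (List (String × String)))) : List String :=
  let best : Nat :=
    (metas.getD []).foldl (fun b m => min b (pvRankOf ((PySem.Dict.mk m).get? "type"))) 5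
  pvSuggestions best

-- ===== PRECONDITION & SPEC =====
def Spec_generate_base_suggestions (q_lower : String) (metas : Option (List (List (String × String)))) (out : List String) : Prop := out = generate_base_suggestions_alt q_lower metas
instance (q_lower : String) (metas : Option (List (List (String × String)))) (out : List String) : Decidable (Spec_generate_base_suggestions q_lower metas out) := by unfold Spec_generate_base_suggestions; infer_instance

-- ===== CLAIM (what is proved, stated in full; the proofs are below) =====
def Claim_equal_generate_base_suggestions : Prop := ∀ (q_lower : String) (metas : Option (List (List (String × String)))), Dom_generate_base_suggestions q_lower metas → Spec_generate_base_suggestions q_lower metas (generate_base_suggestions q_lower metas)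

-- ===== LEMMAS AND PROOFS =====

lemma pv_mem_fold (t : String) (ht : t ≠ "") (ms : List (List (String × String)))
    (acc : PySem.Set String) :
    (t ∈ ms.foldl (fun acc m =>
      match (PySem.Dict.mk m).get? "type" with
      | some s => if s ≠ "" then PySem.Set.add acc s else acc
      | none => acc) acc) ↔ (t ∈ acc ∨ ∃ m ∈ ms, (PySem.Dict.mk m).get? "type" = some t) := by
  induction ms generalizing acc with
  | nil => simp
  | cons m rest ih =>
    simp only [List.foldl_cons, ih, List.mem_cons]
    cases h : (PySem.Dict.mk m).get? "type" with
    | none =>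
      constructor
      · rintro (hm | ⟨m', hm', hget⟩)
        · exact Or.inl hm
        · exact Or.inr ⟨m', Or.inr hm', hget⟩
      · rintro (hm | ⟨m', hm' | hm', hget⟩)
        · exact Or.inl hm
        · rw [hm', h] at hget; cases hget
        · exact Or.inr ⟨m', hm', hget⟩
    | some s =>
      by_cases hs : s ≠ ""
      · simp only [if_pos hs, PySem.Set.mem_add]
        constructor
        · rintro ((hm | hts) | ⟨m', hm', hget⟩)
          · exact Or.inl hm
          · exact Or.inr ⟨m, Or.inl rfl, by rw [h, hts]⟩
          · exact Or.inr ⟨m', Or.inr hm', hget⟩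
        · rintro (hm | ⟨m', hm' | hm', hget⟩)
          · exact Or.inl (Or.inl hm)
          · rw [hm', h] at hget
            injection hget with hst
            exact Or.inl (Or.inr hst.symm)
          · exact Or.inr ⟨m', hm', hget⟩
      · simp only [if_neg hs]
        push_neg at hs
        constructor
        · rintro (hm | ⟨m', hm', hget⟩)
          · exact Or.inl hm
          · exact Or.inr ⟨m', Or.inr hm', hget⟩
        · rintro (hm | ⟨m', hm' | hm', hget⟩)
          · exact Or.inl hm
          · rw [hm', h, hs] at hget
            injection hget with hst
            exact absurd hst.symm ht
          · exact Or.inr ⟨m', hm', hget⟩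

lemma pv_contains_iff (t : String) (ht : t ≠ "") (ms : List (List (String × String))) :
    PySem.Set.contains (ms.foldl (fun acc m =>
      match (PySem.Dict.mk m).get? "type" with
      | some s => if s ≠ "" then PySem.Set.add acc s else acc
      | none => acc) PySem.Set.empty) t = true
    ↔ ∃ m ∈ ms, (PySem.Dict.mk m).get? "type" = some t := by
  rw [PySem.Set.contains_iff, pv_mem_fold t ht]
  simp [PySem.Set.empty]

lemma pv_fold_min_le (ms : List (List (String × String))) (a k : Nat) :
    (ms.foldl (fun b m => min b (pvRankOf ((PySem.Dict.mk m).get? "type"))) a ≤ k)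
    ↔ (a ≤ k ∨ ∃ m ∈ ms, pvRankOf ((PySem.Dict.mk m).get? "type") ≤ k) := by
  induction ms generalizing a with
  | nil => simp
  | cons m rest ih =>
    simp only [List.foldl_cons, ih, min_le_iff, List.mem_cons]
    constructor
    · rintro ((h | h) | ⟨m', hm', h'⟩)
      · exact Or.inl h
      · exact Or.inr ⟨m, Or.inl rfl, h⟩
      · exact Or.inr ⟨m', Or.inr hm', h'⟩
    · rintro (h | ⟨m', hm' | hm', h'⟩)
      · exact Or.inl (Or.inl h)
      · exact Or.inl (Or.inr (hm' ▸ h'))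
      · exact Or.inr ⟨m', hm', h'⟩

lemma pv_rank_le (o : Option String) (k : Nat) (hk : k ≤ 4) :
    (pvRankOf o ≤ k) ↔
      ((0 ≤ k ∧ o = some "doctor") ∨ (1 ≤ k ∧ o = some "department") ∨
       (2 ≤ k ∧ o = some "facility") ∨ (3 ≤ k ∧ o = some "daycare") ∨
       (4 ≤ k ∧ o = some "health_library")) := by
  unfold pvRankOf
  split_ifs with h1 h2 h3 h4 h5 <;>
    simp_all [beq_iff_eq] <;> omega

-- ===== VERDICT (by name: the statement is the Claim_ definition above) =====
theorem generate_base_suggestions_spec : Claim_equal_generate_base_suggestions := by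
  intro q_lower metas _
  unfold Spec_generate_base_suggestions generate_base_suggestions generate_base_suggestions_alt
  set ms := metas.getD [] with hms
  set best := ms.foldl (fun b m => min b (pvRankOf ((PySem.Dict.mk m).get? "type"))) 5 with hbest
  have hchar : ∀ k : Nat, k ≤ 4 → (best ≤ k ↔
      ((0 ≤ k ∧ ∃ m ∈ ms, (PySem.Dict.mk m).get? "type" = some "doctor") ∨
       (1 ≤ k ∧ ∃ m ∈ ms, (PySem.Dict.mk m).get? "type" = some "department") ∨
       (2 ≤ k ∧ ∃ m ∈ ms, (PySem.Dict.mk m).get? "type" = some "facility") ∨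
       (3 ≤ k ∧ ∃ m ∈ ms, (PySem.Dict.mk m).get? "type" = some "daycare") ∨
       (4 ≤ k ∧ ∃ m ∈ ms, (PySem.Dict.mk m).get? "type" = some "health_library"))) := by
    intro k hk
    rw [hbest, pv_fold_min_le]
    constructor
    · rintro (h | ⟨m, hm, hr⟩)
      · omega
      · rcases (pv_rank_le _ k hk).1 hr with ⟨h1,h2⟩|⟨h1,h2⟩|⟨h1,h2⟩|⟨h1,h2⟩|⟨h1,h2⟩
        · exact Or.inl ⟨h1, m, hm, h2⟩
        · exact Or.inr (Or.inl ⟨h1, m, hm, h2⟩)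
        · exact Or.inr (Or.inr (Or.inl ⟨h1, m, hm, h2⟩))
        · exact Or.inr (Or.inr (Or.inr (Or.inl ⟨h1, m, hm, h2⟩)))
        · exact Or.inr (Or.inr (Or.inr (Or.inr ⟨h1, m, hm, h2⟩)))
    · rintro (⟨h1, m, hm, h2⟩|⟨h1, m, hm, h2⟩|⟨h1, m, hm, h2⟩|⟨h1, m, hm, h2⟩|⟨h1, m, hm, h2⟩) <;>
        exact Or.inr ⟨m, hm, (pv_rank_le _ k hk).2 (by simp [h2] <;> omega)⟩
  by_cases h0 : ∃ m ∈ ms, (PySem.Dict.mk m).get? "type" = some "doctor"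
  · have hb : best = 0 := Nat.le_zero.mp ((hchar 0 (by norm_num)).2 (Or.inl ⟨le_refl _, h0⟩))
    rw [if_pos ((pv_contains_iff "doctor" (by decide) ms).2 h0), hb]
    rfl
  · rw [if_neg (by rw [pv_contains_iff "doctor" (by decide) ms]; exact h0)]
    by_cases h1 : ∃ m ∈ ms, (PySem.Dict.mk m).get? "type" = some "department"
    · have hle : best ≤ 1 := (hchar 1 (by norm_num)).2 (Or.inr (Or.inl ⟨le_refl _, h1⟩))
      have hgt : ¬ best ≤ 0 := by
        rw [hchar 0 (by norm_num)]; rintro (⟨_,h⟩|⟨h,_⟩|⟨h,_⟩|⟨h,_⟩|⟨h,_⟩) <;> first | exact h0 h | omega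
      have hb : best = 1 := by omega
      rw [if_pos ((pv_contains_iff "department" (by decide) ms).2 h1), hb]
      rfl
    · rw [if_neg (by rw [pv_contains_iff "department" (by decide) ms]; exact h1)]
      by_cases h2 : ∃ m ∈ ms, (PySem.Dict.mk m).get? "type" = some "facility"
      · have hle : best ≤ 2 := (hchar 2 (by norm_num)).2 (Or.inr (Or.inr (Or.inl ⟨le_refl _, h2⟩)))
        have hgt : ¬ best ≤ 1 := by
          rw [hchar 1 (by norm_num)]
          rintro (⟨_,h⟩|⟨_,h⟩|⟨h,_⟩|⟨h,_⟩|⟨h,_⟩) <;> first | exact h0 h | exact h1 h | omega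
        have hb : best = 2 := by omega
        rw [if_pos ((pv_contains_iff "facility" (by decide) ms).2 h2), hb]
        rfl
      · rw [if_neg (by rw [pv_contains_iff "facility" (by decide) ms]; exact h2)]
        by_cases h3 : ∃ m ∈ ms, (PySem.Dict.mk m).get? "type" = some "daycare"
        · have hle : best ≤ 3 := (hchar 3 (by norm_num)).2 (Or.inr (Or.inr (Or.inr (Or.inl ⟨le_refl _, h3⟩))))
          have hgt : ¬ best ≤ 2 := by
            rw [hchar 2 (by norm_num)]
            rintro (⟨_,h⟩|⟨_,h⟩|⟨_,h⟩|⟨h,_⟩|⟨h,_⟩) <;> first | exact h0 h | exact h1 h | exact h2 h | omega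
          have hb : best = 3 := by omega
          rw [if_pos ((pv_contains_iff "daycare" (by decide) ms).2 h3), hb]
          rfl
        · rw [if_neg (by rw [pv_contains_iff "daycare" (by decide) ms]; exact h3)]
          by_cases h4 : ∃ m ∈ ms, (PySem.Dict.mk m).get? "type" = some "health_library"
          · have hle : best ≤ 4 := (hchar 4 (by norm_num)).2 (Or.inr (Or.inr (Or.inr (Or.inr ⟨le_refl _, h4⟩))))
            have hgt : ¬ best ≤ 3 := by
              rw [hchar 3 (by norm_num)]
              rintro (⟨_,h⟩|⟨_,h⟩|⟨_,h⟩|⟨_,h⟩|⟨h,_⟩) <;> first | exact h0 h | exact h1 h | exact h2 h | exact h3 h | omega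
            have hb : best = 4 := by omega
            rw [if_pos ((pv_contains_iff "health_library" (by decide) ms).2 h4), hb]
            rfl
          · rw [if_neg (by rw [pv_contains_iff "health_library" (by decide) ms]; exact h4)]
            have hle : best ≤ 5 := by
              rw [hbest, pv_fold_min_le]; exact Or.inl (le_refl _)
            have hgt : ¬ best ≤ 4 := by
              rw [hchar 4 (by norm_num)]
              rintro (⟨_,h⟩|⟨_,h⟩|⟨_,h⟩|⟨_,h⟩|⟨_,h⟩) <;>
                first | exact h0 h | exact h1 h | exact h2 h | exact h3 h | exact h4 h
            have hb : best = 5 := by omega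
            rw [hb]
            rfl
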